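-- pv_equiv track=rewrite | github.com/nilkanth02/Sentinel-AI | Backend/app/agent/reasoner.py | _generate_jailbreak_recommendations
-- ===== SOURCE A (Python) =====
-- from typing import Dict, Any, List
--
-- def _generate_jailbreak_recommendations(decision: str, key_factors: List[str]) -> List[str]:
--     """Generate recommendations including jailbreak-specific actions."""
--     recommendations = []
--
--     if decision == "escalate":
--         recommendations.extend([
--             "Immediate escalation to human reviewer",
--             "Consider blocking this interaction",
--             "Log for security analysis and pattern tracking",
--             "Review user account for suspicious activity"
--         ])
--     elif decision == "warn":
--         recommendations.extend([
--             "Monitor user for repeated attempts",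
--             "Log jailbreak attempt for analysis",
--             "Consider additional authentication",
--             "Review similar patterns in system"
--         ])
--     elif decision == "block":
--         recommendations.extend([
--             "Block this response immediately",
--             "Log for security analysis",
--             "Review user interaction history"
--         ])
--     else:  # allow
--         recommendations.extend([
--             "Continue normal monitoring",
--             "Log for trend analysis"
--         ])
--
--     # Add specific recommendations based on factors
--     if any("jailbreak" in factor.lower() for factor in key_factors):
--         recommendations.append("Update jailbreak pattern database")
--
--     if any("prompt" in factor.lower() for factor in key_factors):
--         recommendations.append("Review prompt injection patterns")
--
--     if any("output" in factor.lower() for factor in key_factors):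
--         recommendations.append("Enhance output filtering")
--
--     return recommendations
-- ===== SOURCE B (Python) =====
-- def _generate_jailbreak_recommendations(decision, key_factors):
--     """Single pass over key_factors collecting keyword flags, then assemble."""
--     if decision == "escalate":
--         base = [
--             "Immediate escalation to human reviewer",
--             "Consider blocking this interaction",
--             "Log for security analysis and pattern tracking",
--             "Review user account for suspicious activity",
--         ]
--     elif decision == "warn":
--         base = [
--             "Monitor user for repeated attempts",
--             "Log jailbreak attempt for analysis",
--             "Consider additional authentication",
--             "Review similar patterns in system",
--         ]
--     elif decision == "block":
--         base = [
--             "Block this response immediately",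
--             "Log for security analysis",
--             "Review user interaction history",
--         ]
--     else:
--         base = [
--             "Continue normal monitoring",
--             "Log for trend analysis",
--         ]
--
--     has_jb = has_pr = has_out = False
--     for factor in key_factors:
--         lf = factor.lower()
--         has_jb = has_jb or "jailbreak" in lf
--         has_pr = has_pr or "prompt" in lf
--         has_out = has_out or "output" in lf
--
--     tail = []
--     if has_jb:
--         tail.append("Update jailbreak pattern database")
--     if has_pr:
--         tail.append("Review prompt injection patterns")
--     if has_out:
--         tail.append("Enhance output filtering")
--     return base + tail
-- ===== Notes on version B (the rewrite author's own statement) =====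
-- stated objective: faster
-- what changed: Replaced the three separate any() scans (each lowercasing every factor again) with one loop that lowercases each factor once and sets three keyword flags, then appends the three tail recommendations from the flags.
import Mathlib
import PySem

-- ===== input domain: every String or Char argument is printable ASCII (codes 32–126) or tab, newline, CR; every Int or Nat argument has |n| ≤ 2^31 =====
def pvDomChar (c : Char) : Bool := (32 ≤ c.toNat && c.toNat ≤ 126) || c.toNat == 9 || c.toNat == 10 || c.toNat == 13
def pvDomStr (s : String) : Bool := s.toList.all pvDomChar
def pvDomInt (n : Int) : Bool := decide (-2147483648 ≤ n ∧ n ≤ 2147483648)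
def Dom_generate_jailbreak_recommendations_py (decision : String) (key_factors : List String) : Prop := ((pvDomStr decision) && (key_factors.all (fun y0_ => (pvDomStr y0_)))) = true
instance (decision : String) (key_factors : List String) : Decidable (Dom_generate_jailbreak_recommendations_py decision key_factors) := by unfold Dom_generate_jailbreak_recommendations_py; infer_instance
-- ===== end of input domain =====

-- B replaces A's three separate any() scans with one pass over key_factors that
-- lowercases each factor once and sets three keyword flags (objective: alternative).

-- ===== PORT A =====
def generate_jailbreak_recommendations_py (decision : String) (key_factors : List String) : List String :=
  let recommendations : List String :=
    if decision == "escalate" then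
      ["Immediate escalation to human reviewer",
       "Consider blocking this interaction",
       "Log for security analysis and pattern tracking",
       "Review user account for suspicious activity"]
    else if decision == "warn" then
      ["Monitor user for repeated attempts",
       "Log jailbreak attempt for analysis",
       "Consider additional authentication",
       "Review similar patterns in system"]
    else if decision == "block" then
      ["Block this response immediately",
       "Log for security analysis",
       "Review user interaction history"]
    else
      ["Continue normal monitoring",
       "Log for trend analysis"]
  let recommendations :=
    if key_factors.any (fun factor => PySem.Str.isIn "jailbreak" (PySem.Str.lower factor)) then
      recommendations ++ ["Update jailbreak pattern database"]
    else recommendations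
  let recommendations :=
    if key_factors.any (fun factor => PySem.Str.isIn "prompt" (PySem.Str.lower factor)) then
      recommendations ++ ["Review prompt injection patterns"]
    else recommendations
  let recommendations :=
    if key_factors.any (fun factor => PySem.Str.isIn "output" (PySem.Str.lower factor)) then
      recommendations ++ ["Enhance output filtering"]
    else recommendations
  recommendations

-- ===== PORT B =====
def generate_jailbreak_recommendations_py_alt (decision : String) (key_factors : List String) : List String :=
  let base : List String :=
    if decision == "escalate" then
      ["Immediate escalation to human reviewer",
       "Consider blocking this interaction",
       "Log for security analysis and pattern tracking",
       "Review user account for suspicious activity"]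
    else if decision == "warn" then
      ["Monitor user for repeated attempts",
       "Log jailbreak attempt for analysis",
       "Consider additional authentication",
       "Review similar patterns in system"]
    else if decision == "block" then
      ["Block this response immediately",
       "Log for security analysis",
       "Review user interaction history"]
    else
      ["Continue normal monitoring",
       "Log for trend analysis"]
  let flags : Bool × Bool × Bool :=
    key_factors.foldl
      (fun fl factor =>
        let lf := PySem.Str.lower factor
        (fl.1 || PySem.Str.isIn "jailbreak" lf,
         fl.2.1 || PySem.Str.isIn "prompt" lf,
         fl.2.2 || PySem.Str.isIn "output" lf))
      (false, false, false)
  let tail : List String := []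
  let tail := if flags.1 then tail ++ ["Update jailbreak pattern database"] else tail
  let tail := if flags.2.1 then tail ++ ["Review prompt injection patterns"] else tail
  let tail := if flags.2.2 then tail ++ ["Enhance output filtering"] else tail
  base ++ tail

-- ===== PRECONDITION & SPEC =====
def Spec_generate_jailbreak_recommendations_py (decision : String) (key_factors : List String) (out : List String) : Prop := out = generate_jailbreak_recommendations_py_alt decision key_factors
instance (decision : String) (key_factors : List String) (out : List String) : Decidable (Spec_generate_jailbreak_recommendations_py decision key_factors out) := by unfold Spec_generate_jailbreak_recommendations_py; infer_instance

-- ===== CLAIM (what is proved, stated in full; the proofs are below) =====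
def Claim_equal_generate_jailbreak_recommendations_py : Prop := ∀ (decision : String) (key_factors : List String), Dom_generate_jailbreak_recommendations_py decision key_factors → Spec_generate_jailbreak_recommendations_py decision key_factors (generate_jailbreak_recommendations_py decision key_factors)

-- ===== LEMMAS AND PROOFS =====

/-- The one-pass flag fold computes the three `any` scans. -/
theorem pv_flags_eq (l : List String) (a b c : Bool) :
    l.foldl
      (fun (fl : Bool × Bool × Bool) factor =>
        let lf := PySem.Str.lower factor
        (fl.1 || PySem.Str.isIn "jailbreak" lf,
         fl.2.1 || PySem.Str.isIn "prompt" lf,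
         fl.2.2 || PySem.Str.isIn "output" lf))
      (a, b, c)
    = (a || l.any (fun f => PySem.Str.isIn "jailbreak" (PySem.Str.lower f)),
       b || l.any (fun f => PySem.Str.isIn "prompt" (PySem.Str.lower f)),
       c || l.any (fun f => PySem.Str.isIn "output" (PySem.Str.lower f))) := by
  induction l generalizing a b c with
  | nil => simp
  | cons x xs ih =>
      simp only [List.foldl_cons, List.any_cons, ih, Bool.or_assoc]

theorem generate_jailbreak_recommendations_py_eq_alt (decision : String) (key_factors : List String) :
    generate_jailbreak_recommendations_py decision key_factors
      = generate_jailbreak_recommendations_py_alt decision key_factors := by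
  unfold generate_jailbreak_recommendations_py generate_jailbreak_recommendations_py_alt
  simp only [pv_flags_eq, Bool.false_or]
  cases hj : key_factors.any (fun f => PySem.Str.isIn "jailbreak" (PySem.Str.lower f)) <;>
  cases hp : key_factors.any (fun f => PySem.Str.isIn "prompt" (PySem.Str.lower f)) <;>
  cases ho : key_factors.any (fun f => PySem.Str.isIn "output" (PySem.Str.lower f)) <;>
  simp

-- ===== VERDICT (by name: the statement is the Claim_ definition above) =====
theorem generate_jailbreak_recommendations_py_spec : Claim_equal_generate_jailbreak_recommendations_py := by
  intro decision key_factors _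
  exact generate_jailbreak_recommendations_py_eq_alt decision key_factors
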